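-- pv_equiv track=rewrite | github.com/GuanhuaJi/CADmimic | code_extraction.py | _pick_best_block
-- ===== SOURCE A (Python) =====
-- from typing import List
--
-- PY_HINTS = (
--     "import cadquery", "from cadquery", "show_object(", "cq.Workplane(", "result"
-- )
--
-- def _pick_best_block(blocks: List[str]) -> str:
--     if not blocks:
--         return ""
--     # prefer blocks that mention CadQuery / result / show_object
--     scored = []
--     for b in blocks:
--         score = sum(h in b for h in PY_HINTS)
--         scored.append((score, len(b), b))
--     scored.sort(reverse=True)
--     return scored[0][2]
-- ===== SOURCE B (Python) =====
-- from typing import List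
--
-- PY_HINTS = (
--     "import cadquery", "from cadquery", "show_object(", "cq.Workplane(", "result"
-- )
--
-- def _score(b: str) -> int:
--     return len([h for h in PY_HINTS if h in b])
--
-- def _beats(cur: str, cand: str) -> bool:
--     cs, ns = _score(cur), _score(cand)
--     if cs != ns:
--         return ns > cs
--     if len(cur) != len(cand):
--         return len(cand) > len(cur)
--     return cand > cur
--
-- def _pick_best_block(blocks: List[str]) -> str:
--     if not blocks:
--         return ""
--     best = blocks[0]
--     for cand in blocks[1:]:
--         if _beats(best, cand):
--             best = cand
--     return best
-- ===== Notes on version B (the rewrite author's own statement) =====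
-- stated objective: simpler
-- what changed: Replaces building a (score,len,block) tuple list and reverse-sorting it with a single selection pass keeping the running best block, comparing candidates by explicit nested score/length/lexicographic tests (scores computed by filtering the hint list) instead of tuple comparison on a sorted list.
import Mathlib
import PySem

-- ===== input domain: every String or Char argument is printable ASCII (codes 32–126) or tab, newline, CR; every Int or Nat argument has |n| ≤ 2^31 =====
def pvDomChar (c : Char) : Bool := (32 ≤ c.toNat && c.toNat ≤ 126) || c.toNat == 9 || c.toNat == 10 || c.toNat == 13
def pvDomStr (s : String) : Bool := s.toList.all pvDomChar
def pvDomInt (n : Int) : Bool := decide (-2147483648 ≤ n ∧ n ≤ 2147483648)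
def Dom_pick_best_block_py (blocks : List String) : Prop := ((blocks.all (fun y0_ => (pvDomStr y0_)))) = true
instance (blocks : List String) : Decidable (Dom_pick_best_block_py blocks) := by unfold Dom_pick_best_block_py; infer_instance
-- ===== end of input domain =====

-- B replaces A's build-score-list-then-reverse-sort with a single selection pass (running best via explicit nested score/length/lexicographic tests); objective: simpler.


-- ===== PORT A =====
-- PY_HINTS
def pvHints : List String :=
  ["import cadquery", "from cadquery", "show_object(", "cq.Workplane(", "result"]

-- score = sum(h in b for h in PY_HINTS); len(b); the tuple (score, len(b), b)
def pvKey (b : String) : Int × Int × String :=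
  (pvHints.foldl (fun acc h => acc + (if PySem.Str.isIn h b then 1 else 0)) 0,
   PySem.Str.len b, b)

-- Python tuple '<' on (int, int, str): lexicographic (String '<' is Python's code-point order)
def pvLt3 (a b : Int × Int × String) : Bool :=
  decide (a.1 < b.1) ||
    (a.1 == b.1 && (decide (a.2.1 < b.2.1) ||
      (a.2.1 == b.2.1 && decide (a.2.2 < b.2.2))))

-- literal port of A: guard, build scored, scored.sort(reverse=True) as a stable
-- descending insertion sort under the tuple order (exact: list.sort is stable,
-- and equal tuples here are identical, so any stable sort yields the same list),
-- then scored[0][2]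
def pick_best_block_py (blocks : List String) : String :=
  if blocks = [] then ""
  else
    let scored := blocks.map pvKey
    let sortedScored :=
      scored.foldl (fun acc t => PySem.List.insertBy (fun p q => pvLt3 q p) t acc) []
    match sortedScored with
    | [] => ""
    | t :: _ => t.2.2

-- ===== PORT B =====
-- B's hint tuple
def pvHintsB : List String :=
  ["import cadquery", "from cadquery", "show_object(", "cq.Workplane(", "result"]

-- _score: len([h for h in PY_HINTS if h in b])
def pvScoreB (b : String) : Int :=
  ((pvHintsB.filter (fun h => PySem.Str.isIn h b)).length : Int)

-- _beats: nested score / length / lexicographic tests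
def pvBeats (cur cand : String) : Bool :=
  if pvScoreB cur ≠ pvScoreB cand then decide (pvScoreB cur < pvScoreB cand)
  else if PySem.Str.len cur ≠ PySem.Str.len cand then
    decide (PySem.Str.len cur < PySem.Str.len cand)
  else decide (cur < cand)

-- the selection loop: keep the running best, recursively
def pvSelect (best : String) (rest : List String) : String :=
  match rest with
  | [] => best
  | cand :: more => pvSelect (if pvBeats best cand then cand else best) more

-- literal port of B: guard, then one selection pass over blocks[1:]
def pick_best_block_py_alt (blocks : List String) : String :=
  match blocks with
  | [] => ""
  | b :: rest => pvSelect b rest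

-- ===== PRECONDITION & SPEC =====
def Spec_pick_best_block_py (blocks : List String) (out : String) : Prop := out = pick_best_block_py_alt blocks
instance (blocks : List String) (out : String) : Decidable (Spec_pick_best_block_py blocks out) := by unfold Spec_pick_best_block_py; infer_instance

-- ===== CLAIM (what is proved, stated in full; the proofs are below) =====
def Claim_equal_pick_best_block_py : Prop := ∀ (blocks : List String), Dom_pick_best_block_py blocks → Spec_pick_best_block_py blocks (pick_best_block_py blocks)

-- ===== LEMMAS AND PROOFS =====

-- A's indicator-sum score equals B's filter-length score
lemma pv_count (b : String) (l : List String) :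
    ∀ acc : Int,
      l.foldl (fun acc h => acc + (if PySem.Str.isIn h b then 1 else 0)) acc
        = acc + ((l.filter (fun h => PySem.Str.isIn h b)).length : Int) := by
  induction l with
  | nil => intro acc; simp
  | cons h l ih =>
      intro acc
      simp only [List.foldl_cons, List.filter_cons]
      by_cases hh : PySem.Str.isIn h b = true
      · rw [if_pos hh, if_pos hh, ih, List.length_cons]; push_cast; ring
      · rw [if_neg hh, if_neg hh, ih, add_zero]

lemma pv_score_eq (b : String) : (pvKey b).1 = pvScoreB b := by
  show pvHints.foldl (fun acc h => acc + (if PySem.Str.isIn h b then 1 else 0)) 0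
      = pvScoreB b
  rw [pv_count, pvScoreB, show pvHintsB = pvHints from rfl]
  simp

-- abstract form: nested equality tests vs lexicographic tuple comparison
lemma pv_beats_abstract (s1 s2 l1 l2 : Int) (a x : String) :
    (if s1 ≠ s2 then decide (s1 < s2)
     else if l1 ≠ l2 then decide (l1 < l2)
     else decide (a < x))
      = (decide (s1 < s2) ||
          (s1 == s2 && (decide (l1 < l2) || (l1 == l2 && decide (a < x))))) := by
  by_cases hs : s1 = s2
  · by_cases hl : l1 = l2
    · simp [hs, hl]
    · simp [hs, hl]
  · have : ¬ s2 < s1 ∨ ¬ s1 < s2 := by omega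
    simp [hs]

-- B's nested-test comparison agrees with A's tuple comparison on keys
lemma pv_beats_eq_lt3 (a x : String) : pvBeats a x = pvLt3 (pvKey a) (pvKey x) := by
  unfold pvBeats pvLt3
  rw [← pv_score_eq a, ← pv_score_eq x]
  exact pv_beats_abstract (pvKey a).1 (pvKey x).1 (PySem.Str.len a) (PySem.Str.len x) a x

-- unfolding B's port on a nonempty list
lemma pv_alt_cons (b : String) (rest : List String) :
    pick_best_block_py_alt (b :: rest) = pvSelect b rest := rfl

-- the head of the descending insertion-sort fold is the running maximum
lemma pv_head_foldl_ins (ks : List (Int × Int × String)) :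
    ∀ (acc : List (Int × Int × String)) (x0 : Int × Int × String),
      acc.head? = some x0 →
      (ks.foldl (fun a t => PySem.List.insertBy (fun p q => pvLt3 q p) t a) acc).head?
        = some (ks.foldl (fun m t => if pvLt3 m t then t else m) x0) := by
  induction ks with
  | nil => intro acc x0 h; simpa using h
  | cons k ks ih =>
      intro acc x0 h
      cases acc with
      | nil => simp at h
      | cons y t =>
          simp only [List.head?_cons, Option.some.injEq] at h
          subst h
          simp only [List.foldl_cons]
          apply ih
          simp only [PySem.List.insertBy]
          by_cases hlt : pvLt3 y k = true
          · simp [hlt]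
          · simp [hlt]

-- the running maximum over keys is the key of the running best block
lemma pv_foldl_key (rest : List String) :
    ∀ (a : String),
      rest.foldl (fun m x => if pvLt3 m (pvKey x) then pvKey x else m) (pvKey a)
        = pvKey (rest.foldl (fun best x => if pvLt3 (pvKey best) (pvKey x) then x else best) a) := by
  induction rest with
  | nil => intro a; rfl
  | cons r rest ih =>
      intro a
      simp only [List.foldl_cons]
      by_cases hlt : pvLt3 (pvKey a) (pvKey r) = true
      · simp [hlt, ih]
      · simp [hlt, ih]

-- B's recursive selection loop is the foldl selection with the tuple comparison
lemma pv_select_eq_foldl (rest : List String) :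
    ∀ (a : String),
      pvSelect a rest
        = rest.foldl (fun best x => if pvLt3 (pvKey best) (pvKey x) then x else best) a := by
  induction rest with
  | nil => intro a; rfl
  | cons r rest ih =>
      intro a
      simp only [pvSelect, List.foldl_cons, pv_beats_eq_lt3, ih]

-- ===== VERDICT (by name: the statement is the Claim_ definition above) =====
theorem pick_best_block_py_spec : Claim_equal_pick_best_block_py := by
  intro blocks _
  unfold Spec_pick_best_block_py
  cases blocks with
  | nil => rfl
  | cons b rest =>
      unfold pick_best_block_py
      rw [pv_alt_cons, pv_select_eq_foldl]
      simp only [if_neg (List.cons_ne_nil b rest), List.map_cons,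
        List.foldl_cons]
      have h0 : (PySem.List.insertBy (fun p q => pvLt3 q p) (pvKey b)
          ([] : List (Int × Int × String))).head? = some (pvKey b) := by
        simp [PySem.List.insertBy]
      have h := pv_head_foldl_ins (rest.map pvKey) _ _ h0
      rw [List.foldl_map, List.foldl_map, pv_foldl_key] at h
      simp only [List.foldl_map]
      set L := (rest.foldl (fun x y => PySem.List.insertBy (fun p q => pvLt3 q p) (pvKey y) x)
        (PySem.List.insertBy (fun p q => pvLt3 q p) (pvKey b) [])) with hL
      cases hc : L with
      | nil => rw [hc] at h; simp at h
      | cons t ts =>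
          rw [hc] at h
          simp only [List.head?_cons, Option.some.injEq] at h
          simp [h, pvKey]
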